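-- pv_equiv track=rewrite | github.com/yida7942-create/gmat-tutor | extract_og.py | find_sections
-- ===== SOURCE A (Python) =====
-- from typing import List, Dict, Optional, Tuple
--
-- def find_sections(lines: List[str]) -> Dict[str, int]:
--     """Find line numbers of key sections (uses LAST occurrence, not TOC)."""
--     rc_q_start = rc_ak_start = rc_exp_start = None
--     cr_q_start = cr_ak_start = cr_exp_start = None
--
--     for i, line in enumerate(lines):
--         s = line.strip()
--         # RC sections
--         if '4.4 Practice Questions: Reading Comprehension' in s:
--             rc_q_start = i
--         if '4.5 Answer Key: Reading Comprehension' in s: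
--             rc_ak_start = i
--         if '4.6 Answer Explanations: Reading Comprehension' in s:
--             rc_exp_start = i
--         # CR sections
--         if '4.7 Practice Questions: Critical Reasoning' in s:
--             cr_q_start = i
--         if '4.8 Answer Key: Critical Reasoning' in s:
--             cr_ak_start = i
--         if '4.9 Answer Explanations: Critical Reasoning' in s:
--             cr_exp_start = i
--
--     # Find CR exp_end: first '5.0' or 'Appendix' AFTER cr_exp_start
--     cr_exp_end = len(lines)
--     if cr_exp_start is not None:
--         for i in range(cr_exp_start + 1, len(lines)):
--             s = lines[i].strip()
--             if s.startswith('5.0 GMAT') or s.startswith('Appendix'):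
--                 cr_exp_end = i
--                 break
--
--     return {
--         # RC
--         'rc_q_start': rc_q_start,
--         'rc_ak_start': rc_ak_start,
--         'rc_exp_start': rc_exp_start,
--         # CR
--         'q_start': cr_q_start,  # backward compat
--         'ak_start': cr_ak_start,
--         'exp_start': cr_exp_start,
--         'exp_end': cr_exp_end,
--     }
-- ===== SOURCE B (Python) =====
-- def find_sections(lines):
--     """Find line numbers of key sections (uses LAST occurrence, not TOC)."""
--     def last_index(marker):
--         # scan from the end: first hit from the back == last occurrence
--         for i, line in reversed(list(enumerate(lines))):
--             if marker in line.strip():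
--                 return i
--         return None
--
--     rc_q_start = last_index('4.4 Practice Questions: Reading Comprehension')
--     rc_ak_start = last_index('4.5 Answer Key: Reading Comprehension')
--     rc_exp_start = last_index('4.6 Answer Explanations: Reading Comprehension')
--     cr_q_start = last_index('4.7 Practice Questions: Critical Reasoning')
--     cr_ak_start = last_index('4.8 Answer Key: Critical Reasoning')
--     cr_exp_start = last_index('4.9 Answer Explanations: Critical Reasoning')
--
--     if cr_exp_start is None:
--         cr_exp_end = len(lines)
--     else:
--         cr_exp_end = next((i for i in range(cr_exp_start + 1, len(lines))
--                            if lines[i].strip().startswith(('5.0 GMAT', 'Appendix'))),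
--                           len(lines))
--
--     return {
--         'rc_q_start': rc_q_start,
--         'rc_ak_start': rc_ak_start,
--         'rc_exp_start': rc_exp_start,
--         'q_start': cr_q_start,
--         'ak_start': cr_ak_start,
--         'exp_start': cr_exp_start,
--         'exp_end': cr_exp_end,
--     }
-- ===== Notes on version B (the rewrite author's own statement) =====
-- stated objective: simpler
-- what changed: Replaces the single forward loop that overwrites six state variables with a reusable last_index helper scanning from the end (first hit from the back = last occurrence), called once per marker, and the end-marker scan with next() over a generator.
import Mathlib
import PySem

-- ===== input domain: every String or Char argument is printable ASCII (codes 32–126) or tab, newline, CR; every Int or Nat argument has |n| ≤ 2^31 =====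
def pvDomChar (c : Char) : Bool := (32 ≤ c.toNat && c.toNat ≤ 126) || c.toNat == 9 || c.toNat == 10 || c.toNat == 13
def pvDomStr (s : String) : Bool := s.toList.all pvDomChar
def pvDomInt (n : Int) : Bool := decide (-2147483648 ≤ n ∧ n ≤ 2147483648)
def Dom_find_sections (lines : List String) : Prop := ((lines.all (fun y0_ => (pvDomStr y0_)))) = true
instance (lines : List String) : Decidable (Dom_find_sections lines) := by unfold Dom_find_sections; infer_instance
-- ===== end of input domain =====

-- B computes each section's last occurrence with a backward scan per marker instead of A's
-- single forward loop overwriting six variables; return values are equal (objective: simpler).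

-- ===== PORT A =====
-- one iteration of A's loop; state = (rc_q, rc_ak, rc_exp, cr_q, cr_ak, cr_exp)
def find_sections_step (st : Option Int × Option Int × Option Int × Option Int × Option Int × Option Int)
    (p : Int × String) : Option Int × Option Int × Option Int × Option Int × Option Int × Option Int :=
  match st with
  | (r1, r2, r3, r4, r5, r6) =>
    let s := PySem.Str.strip p.2
    ( if PySem.Str.isIn "4.4 Practice Questions: Reading Comprehension" s then some p.1 else r1,
      if PySem.Str.isIn "4.5 Answer Key: Reading Comprehension" s then some p.1 else r2,
      if PySem.Str.isIn "4.6 Answer Explanations: Reading Comprehension" s then some p.1 else r3,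
      if PySem.Str.isIn "4.7 Practice Questions: Critical Reasoning" s then some p.1 else r4,
      if PySem.Str.isIn "4.8 Answer Key: Critical Reasoning" s then some p.1 else r5,
      if PySem.Str.isIn "4.9 Answer Explanations: Critical Reasoning" s then some p.1 else r6 )

-- A's 'for i in range(cr_exp_start+1, len(lines)): … break' loop (s = lines[i].strip() written inline)
def find_sections_endLoop (lines : List String) (idxs : List Int) (cur : Int) : Int :=
  match idxs with
  | [] => cur
  | i :: rest =>
    if PySem.Str.startswith (PySem.Str.strip (PySem.List.pyGetD lines i "")) "5.0 GMAT" ||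
       PySem.Str.startswith (PySem.Str.strip (PySem.List.pyGetD lines i "")) "Appendix" then i
    else find_sections_endLoop lines rest cur

def find_sections (lines : List String) : List (String × Option Int) :=
  match (PySem.List.enumerate lines 0).foldl find_sections_step (none, none, none, none, none, none) with
  | (rc_q, rc_ak, rc_exp, cr_q, cr_ak, cr_exp) =>
    let cr_exp_end : Int :=
      match cr_exp with
      | none => (lines.length : Int)
      | some v => find_sections_endLoop lines (PySem.List.pyRange (v + 1) (lines.length : Int) 1) (lines.length : Int)
    [ ("rc_q_start", rc_q), ("rc_ak_start", rc_ak), ("rc_exp_start", rc_exp),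
      ("q_start", cr_q), ("ak_start", cr_ak), ("exp_start", cr_exp), ("exp_end", some cr_exp_end) ]

-- ===== PORT B =====
-- last_index(marker): first hit scanning enumerate(lines) from the back; 'return i' / fall-through 'return None'
def find_sections_lastIndex (marker : String) (lines : List String) : Option Int :=
  match (PySem.List.enumerate lines 0).reverse.find?
      (fun p => PySem.Str.isIn marker (PySem.Str.strip p.2)) with
  | some p => some p.1
  | none => none

def find_sections_alt (lines : List String) : List (String × Option Int) :=
  let rc_q := find_sections_lastIndex "4.4 Practice Questions: Reading Comprehension" lines
  let rc_ak := find_sections_lastIndex "4.5 Answer Key: Reading Comprehension" lines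
  let rc_exp := find_sections_lastIndex "4.6 Answer Explanations: Reading Comprehension" lines
  let cr_q := find_sections_lastIndex "4.7 Practice Questions: Critical Reasoning" lines
  let cr_ak := find_sections_lastIndex "4.8 Answer Key: Critical Reasoning" lines
  let cr_exp := find_sections_lastIndex "4.9 Answer Explanations: Critical Reasoning" lines
  -- next((i for i in range(cr_exp_start+1, len(lines)) if lines[i].strip().startswith(...)), len(lines))
  let cr_exp_end : Int :=
    match cr_exp with
    | none => (lines.length : Int)
    | some v =>
      ((PySem.List.pyRange (v + 1) (lines.length : Int) 1).find?
          (fun i => PySem.Str.startswith (PySem.Str.strip (PySem.List.pyGetD lines i "")) "5.0 GMAT" ||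
                    PySem.Str.startswith (PySem.Str.strip (PySem.List.pyGetD lines i "")) "Appendix")).getD (lines.length : Int)
  [ ("rc_q_start", rc_q), ("rc_ak_start", rc_ak), ("rc_exp_start", rc_exp),
    ("q_start", cr_q), ("ak_start", cr_ak), ("exp_start", cr_exp), ("exp_end", some cr_exp_end) ]

-- ===== PRECONDITION & SPEC =====
def Spec_find_sections (lines : List String) (out : List (String × Option Int)) : Prop := out = find_sections_alt lines
instance (lines : List String) (out : List (String × Option Int)) : Decidable (Spec_find_sections lines out) := by unfold Spec_find_sections; infer_instance

-- ===== CLAIM (what is proved, stated in full; the proofs are below) =====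
def Claim_equal_find_sections : Prop := ∀ (lines : List String), Dom_find_sections lines → Spec_find_sections lines (find_sections lines)

-- ===== LEMMAS AND PROOFS =====

-- the single-marker overwrite step of A's loop
def pvUpd (c : Int × String → Bool) (acc : Option Int) (p : Int × String) : Option Int :=
  if c p then some p.1 else acc

-- B's predicate for marker m
def pvC (m : String) : Int × String → Bool :=
  fun p => PySem.Str.isIn m (PySem.Str.strip p.2)

-- overwrite-fold forwards = first match of the reversed list
lemma pvUpd_foldl (c : Int × String → Bool) (xs : List (Int × String)) (a : Option Int) :
    xs.foldl (pvUpd c) a = (match xs.reverse.find? c with | some p => some p.1 | none => a) := by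
  induction xs using List.reverseRecOn generalizing a with
  | nil => rfl
  | append_singleton ys x ih =>
    rw [List.foldl_append, List.reverse_append]
    simp only [List.foldl_cons, List.foldl_nil, List.reverse_cons, List.reverse_nil,
      List.nil_append, List.cons_append]
    cases h : c x with
    | false =>
      rw [List.find?_cons_of_neg (by simp [h])]
      simp [pvUpd, h, ih]
    | true =>
      rw [List.find?_cons_of_pos h]
      simp [pvUpd, h]

-- the six-component fold decomposes into six independent single-marker folds
lemma pv_fold6 (xs : List (Int × String)) (a1 a2 a3 a4 a5 a6 : Option Int) :
    xs.foldl find_sections_step (a1, a2, a3, a4, a5, a6) =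
      ( xs.foldl (pvUpd (pvC "4.4 Practice Questions: Reading Comprehension")) a1,
        xs.foldl (pvUpd (pvC "4.5 Answer Key: Reading Comprehension")) a2,
        xs.foldl (pvUpd (pvC "4.6 Answer Explanations: Reading Comprehension")) a3,
        xs.foldl (pvUpd (pvC "4.7 Practice Questions: Critical Reasoning")) a4,
        xs.foldl (pvUpd (pvC "4.8 Answer Key: Critical Reasoning")) a5,
        xs.foldl (pvUpd (pvC "4.9 Answer Explanations: Critical Reasoning")) a6 ) := by
  induction xs generalizing a1 a2 a3 a4 a5 a6 with
  | nil => rfl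
  | cons x xs ih =>
    simp only [List.foldl_cons]
    rw [show find_sections_step (a1, a2, a3, a4, a5, a6) x =
        (pvUpd (pvC "4.4 Practice Questions: Reading Comprehension") a1 x,
         pvUpd (pvC "4.5 Answer Key: Reading Comprehension") a2 x,
         pvUpd (pvC "4.6 Answer Explanations: Reading Comprehension") a3 x,
         pvUpd (pvC "4.7 Practice Questions: Critical Reasoning") a4 x,
         pvUpd (pvC "4.8 Answer Key: Critical Reasoning") a5 x,
         pvUpd (pvC "4.9 Answer Explanations: Critical Reasoning") a6 x) from rfl]
    exact ih _ _ _ _ _ _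

-- A's break-loop = find?.getD over the same index list
lemma pv_endLoop_eq (lines : List String) (idxs : List Int) (cur : Int) :
    find_sections_endLoop lines idxs cur =
      (idxs.find? (fun i =>
          PySem.Str.startswith (PySem.Str.strip (PySem.List.pyGetD lines i "")) "5.0 GMAT" ||
          PySem.Str.startswith (PySem.Str.strip (PySem.List.pyGetD lines i "")) "Appendix")).getD cur := by
  induction idxs with
  | nil => rfl
  | cons i rest ih =>
    simp only [find_sections_endLoop, List.find?_cons]
    cases h : (PySem.Str.startswith (PySem.Str.strip (PySem.List.pyGetD lines i "")) "5.0 GMAT" ||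
        PySem.Str.startswith (PySem.Str.strip (PySem.List.pyGetD lines i "")) "Appendix") with
    | true => simp
    | false => simp [ih]

-- ===== VERDICT (by name: the statement is the Claim_ definition above) =====
theorem find_sections_spec : Claim_equal_find_sections := by
  intro lines _
  unfold Spec_find_sections find_sections find_sections_alt
  rw [pv_fold6]
  simp only [pvUpd_foldl, pv_endLoop_eq, find_sections_lastIndex]
  unfold pvC
  rfl
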